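-- pv_equiv track=rewrite | github.com/topi-chan/CPE23 | main.py | process_quoted_chars
-- ===== SOURCE A (Python) =====
-- def process_quoted_chars(s: str) -> str:
--     """
--     Process the quoted special characters in the input string.
--
--     For CPE 2.3, the special characters (`*`, `?`, `-`, and `\`) may be quoted using
--     the `\` character (Section 6.2.3 of CPE 2.3 Specification). This function returns
--     a string where these quoted characters are processed and unquoted.
--     """
--     out = []
--     i = 0
--     while i < len(s):
--         if s[i] == "\\":
--             if i + 1 < len(s) and s[i + 1] in "*?-\\":
--                 out.append(s[i + 1])
--                 i += 1
--             else:
--                 out.append(s[i])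
--         else:
--             out.append(s[i])
--         i += 1
--     return "".join(out)
-- ===== SOURCE B (Python) =====
-- import re
--
-- _QUOTED = re.compile(r'\\([*?\-\\])')
--
-- def process_quoted_chars(s: str) -> str:
--     """Unquote CPE 2.3 quoted special characters via a single regex substitution."""
--     return _QUOTED.sub(r'\1', s)
-- ===== Notes on version B (the rewrite author's own statement) =====
-- stated objective: idiomatic
-- what changed: Replaced the explicit index loop with an accumulator list by a single compiled regex substitution (pattern backslash followed by one of * ? - backslash, replaced by the captured character): the regex engine scans left to right non-overlapping, so no manual pointer or list is maintained.
import Mathlib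
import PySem

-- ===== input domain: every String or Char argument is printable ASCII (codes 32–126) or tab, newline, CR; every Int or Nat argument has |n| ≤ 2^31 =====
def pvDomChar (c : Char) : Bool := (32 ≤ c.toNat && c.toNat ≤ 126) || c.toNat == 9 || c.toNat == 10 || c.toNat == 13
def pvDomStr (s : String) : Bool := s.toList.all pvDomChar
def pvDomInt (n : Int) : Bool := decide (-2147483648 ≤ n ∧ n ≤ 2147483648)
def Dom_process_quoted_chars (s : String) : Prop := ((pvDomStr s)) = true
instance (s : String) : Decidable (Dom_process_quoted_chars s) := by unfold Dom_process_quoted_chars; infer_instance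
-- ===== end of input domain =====

-- B replaces A's explicit index loop and output list with a single regex substitution
-- re.sub(r'\\([*?\-\\])', r'\1', s); same return value, idiomatic.

-- ===== PORT A =====
-- A's while loop over index i with an `out` accumulator (out.append = ++ [c]).
def pvA_loop (cs : List Char) (i : Nat) (out : List Char) : List Char :=
  if h : i < cs.length then
    if cs[i] = '\\' then
      if h2 : i + 1 < cs.length then
        if cs[i+1] ∈ ['*', '?', '-', '\\'] then
          -- out.append(s[i+1]); i += 1; then i += 1 at loop end
          pvA_loop cs (i + 2) (out ++ [cs[i+1]])
        else
          pvA_loop cs (i + 1) (out ++ [cs[i]])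
      else
        pvA_loop cs (i + 1) (out ++ [cs[i]])
    else
      pvA_loop cs (i + 1) (out ++ [cs[i]])
  else out
termination_by cs.length - i

def process_quoted_chars (s : String) : String :=
  String.mk (pvA_loop s.toList 0 [])

-- ===== PORT B =====
-- The regex engine's non-overlapping left-to-right scan for r'\\([*?\-\\])',
-- replacing each match by its captured group: ported by hand (exact for this
-- pattern: at a backslash the engine matches iff the next char is special and
-- consumes both, otherwise it advances one character).
def pvB_scan : List Char → List Char
  | [] => []
  | c :: rest =>
    if c = '\\' then
      match rest with
      | [] => ['\\']
      | d :: rest' =>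
        if d ∈ ['*', '?', '-', '\\'] then d :: pvB_scan rest'
        else '\\' :: pvB_scan (d :: rest')
    else c :: pvB_scan rest
termination_by cs => cs.length

def process_quoted_chars_alt (s : String) : String :=
  String.mk (pvB_scan s.toList)

-- ===== PRECONDITION & SPEC =====
def Spec_process_quoted_chars (s : String) (out : String) : Prop := out = process_quoted_chars_alt s
instance (s : String) (out : String) : Decidable (Spec_process_quoted_chars s out) := by unfold Spec_process_quoted_chars; infer_instance

-- ===== CLAIM (what is proved, stated in full; the proofs are below) =====
def Claim_equal_process_quoted_chars : Prop := ∀ (s : String), Dom_process_quoted_chars s → Spec_process_quoted_chars s (process_quoted_chars s)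

-- ===== LEMMAS AND PROOFS =====

-- A's loop from position i equals the accumulator followed by B's scan of the suffix.
theorem pvA_loop_eq (cs : List Char) (i : Nat) (out : List Char) :
    pvA_loop cs i out = out ++ pvB_scan (cs.drop i) := by
  by_cases h : i < cs.length
  · have hdrop : cs.drop i = cs[i] :: cs.drop (i + 1) := List.drop_eq_getElem_cons h
    rw [pvA_loop]
    simp only [dif_pos h]
    by_cases hc : cs[i] = '\\'
    · simp only [if_pos hc]
      by_cases h2 : i + 1 < cs.length
      · have hdrop2 : cs.drop (i + 1) = cs[i+1] :: cs.drop (i + 2) :=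
          List.drop_eq_getElem_cons h2
        simp only [dif_pos h2]
        by_cases hs : cs[i+1] ∈ ['*', '?', '-', '\\']
        · rw [if_pos hs, pvA_loop_eq cs (i + 2), hdrop, hdrop2, hc]
          simp only [pvB_scan, if_pos hs, List.append_assoc, List.singleton_append,
            reduceIte]
        · rw [if_neg hs, pvA_loop_eq cs (i + 1), hdrop, hdrop2, hc]
          simp only [pvB_scan, if_neg hs, List.append_assoc, List.singleton_append,
            reduceIte]
      · have hlen : cs.length = i + 1 := by omega
        have hdrop2 : cs.drop (i + 1) = [] := List.drop_eq_nil_of_le (by omega)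
        simp only [dif_neg h2]
        rw [pvA_loop_eq cs (i + 1), hdrop, hdrop2, hc]
        simp only [pvB_scan, List.append_assoc, List.singleton_append, reduceIte]
    · simp only [if_neg hc]
      rw [pvA_loop_eq cs (i + 1), hdrop]
      conv_rhs => rw [pvB_scan.eq_def]
      simp only [if_neg hc, List.append_assoc, List.singleton_append]
  · have h1 : cs.drop i = [] := List.drop_eq_nil_of_le (by omega)
    rw [pvA_loop]
    simp [h, h1, pvB_scan]
termination_by cs.length - i

-- ===== VERDICT (by name: the statement is the Claim_ definition above) =====
theorem process_quoted_chars_spec : Claim_equal_process_quoted_chars := by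
  intro s _
  unfold Spec_process_quoted_chars process_quoted_chars process_quoted_chars_alt
  rw [pvA_loop_eq]
  simp
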